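-- pv_equiv track=rewrite | github.com/bumblezki/ClassicComputerScienceProblemsInPython | Chapter3/word_search.py | satisfied
-- ===== SOURCE A (Python) =====
-- from typing import NamedTuple, List, Dict, Optional, Tuple
--
-- class GridLocation(NamedTuple):
--     row: int
--     column: int
--
-- def satisfied(assignment: Dict[str, List[Tuple[str, GridLocation]]]) -> bool:
--     all_locations: set = set()
--     all_lettered_locations: set = set()
--     for locs in assignment.values():
--         for letter, loc in locs:
--             if loc in all_locations:
--                 if (letter, loc) not in all_lettered_locations:
--                     return False
--             all_locations.add(loc)
--             all_lettered_locations.add((letter, loc))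
--     return True
-- ===== SOURCE B (Python) =====
-- from typing import NamedTuple, List, Dict, Optional, Tuple
--
-- class GridLocation(NamedTuple):
--     row: int
--     column: int
--
-- def satisfied(assignment: Dict[str, List[Tuple[str, GridLocation]]]) -> bool:
--     # Cardinality argument: the placement is consistent iff every location is
--     # claimed by exactly one letter, i.e. the number of distinct locations
--     # equals the number of distinct (letter, location) pairs.
--     pairs = [p for locs in assignment.values() for p in locs]
--     return len({loc for _, loc in pairs}) == len(set(pairs))
-- ===== Notes on version B (the rewrite author's own statement) =====
-- stated objective: simpler
-- what changed: Replaces A's stateful scan with its conflict branch and early return by a global cardinality check: the placement is consistent iff the number of distinct locations equals the number of distinct (letter, location) pairs.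
import Mathlib
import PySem

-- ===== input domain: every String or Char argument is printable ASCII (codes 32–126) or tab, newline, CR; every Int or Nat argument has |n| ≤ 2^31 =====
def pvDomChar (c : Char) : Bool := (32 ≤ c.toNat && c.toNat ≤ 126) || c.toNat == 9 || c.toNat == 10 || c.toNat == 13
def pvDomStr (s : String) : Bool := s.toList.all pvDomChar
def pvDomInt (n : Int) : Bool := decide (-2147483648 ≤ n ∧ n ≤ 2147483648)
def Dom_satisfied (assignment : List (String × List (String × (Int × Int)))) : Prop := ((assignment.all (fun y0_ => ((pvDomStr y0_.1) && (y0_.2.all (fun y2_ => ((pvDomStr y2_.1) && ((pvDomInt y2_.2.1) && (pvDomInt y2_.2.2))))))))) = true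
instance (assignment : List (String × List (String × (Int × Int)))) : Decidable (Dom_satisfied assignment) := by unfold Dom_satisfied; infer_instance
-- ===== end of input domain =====

-- B replaces A's stateful scan (two membership sets, conflict branch, early return)
-- by a global cardinality check: distinct locations = distinct (letter, location) pairs (objective: simpler).


-- ===== PORT A =====
-- inner 'for letter, loc in locs' loop; none = 'return False', some = updated sets
def satInner : List (String × (Int × Int)) → PySem.Set (Int × Int) →
    PySem.Set (String × (Int × Int)) →
    Option (PySem.Set (Int × Int) × PySem.Set (String × (Int × Int)))
  | [], s1, s2 => some (s1, s2)
  | (letter, loc) :: rest, s1, s2 =>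
    if PySem.Set.contains s1 loc && !(PySem.Set.contains s2 (letter, loc)) then none
    else satInner rest (PySem.Set.add s1 loc) (PySem.Set.add s2 (letter, loc))

-- outer 'for locs in assignment.values()' loop
def satOuter : List (String × List (String × (Int × Int))) → PySem.Set (Int × Int) →
    PySem.Set (String × (Int × Int)) → Bool
  | [], _, _ => true
  | (_, locs) :: rest, s1, s2 =>
    match satInner locs s1 s2 with
    | none => false
    | some (s1', s2') => satOuter rest s1' s2'

def satisfied (assignment : List (String × List (String × (Int × Int)))) : Bool :=
  satOuter assignment PySem.Set.empty PySem.Set.empty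

-- ===== PORT B =====
-- len({loc for _, loc in pairs}) == len(set(pairs))
def satisfied_alt (assignment : List (String × List (String × (Int × Int)))) : Bool :=
  let pairs := assignment.flatMap (fun p => p.2)
  (PySem.Set.ofList (pairs.map (fun q => q.2))).length == (PySem.Set.ofList pairs).length

-- ===== PRECONDITION & SPEC =====
def Spec_satisfied (assignment : List (String × List (String × (Int × Int)))) (out : Bool) : Prop := out = satisfied_alt assignment
instance (assignment : List (String × List (String × (Int × Int)))) (out : Bool) : Decidable (Spec_satisfied assignment out) := by unfold Spec_satisfied; infer_instance

-- ===== CLAIM (what is proved, stated in full; the proofs are below) =====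
def Claim_equal_satisfied : Prop := ∀ (assignment : List (String × List (String × (Int × Int)))), Dom_satisfied assignment → Spec_satisfied assignment (satisfied assignment)

-- ===== LEMMAS AND PROOFS =====

-- the consistency predicate both programs decide: each location carries one letter
def SatFunc (ps : List (String × (Int × Int))) : Prop :=
  ∀ l1 l2 loc, (l1, loc) ∈ ps → (l2, loc) ∈ ps → l1 = l2

-- A's two grouped loops fused into one flat loop over all pairs
def satFlat : List (String × (Int × Int)) → PySem.Set (Int × Int) →
    PySem.Set (String × (Int × Int)) → Bool
  | [], _, _ => true
  | (letter, loc) :: rest, s1, s2 =>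
    if PySem.Set.contains s1 loc && !(PySem.Set.contains s2 (letter, loc)) then false
    else satFlat rest (PySem.Set.add s1 loc) (PySem.Set.add s2 (letter, loc))

lemma satInner_flat (xs ys : List (String × (Int × Int))) (s1 : PySem.Set (Int × Int))
    (s2 : PySem.Set (String × (Int × Int))) :
    satFlat (xs ++ ys) s1 s2 =
      match satInner xs s1 s2 with
      | none => false
      | some (s1', s2') => satFlat ys s1' s2' := by
  induction xs generalizing s1 s2 with
  | nil => rfl
  | cons p rest ih =>
    obtain ⟨letter, loc⟩ := p
    by_cases hc : (PySem.Set.contains s1 loc && !(PySem.Set.contains s2 (letter, loc))) = true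
    · simp only [List.cons_append, satFlat, satInner, if_pos hc]
    · simp only [List.cons_append, satFlat, satInner, if_neg hc]
      exact ih _ _

lemma satOuter_eq_satFlat (a : List (String × List (String × (Int × Int))))
    (s1 : PySem.Set (Int × Int)) (s2 : PySem.Set (String × (Int × Int))) :
    satOuter a s1 s2 = satFlat (a.flatMap (fun p => p.2)) s1 s2 := by
  induction a generalizing s1 s2 with
  | nil => rfl
  | cons p rest ih =>
    obtain ⟨w, locs⟩ := p
    rw [List.flatMap_cons, satInner_flat]
    simp only [satOuter]
    cases h : satInner locs s1 s2 with
    | none => rfl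
    | some st => obtain ⟨s1', s2'⟩ := st; exact ih s1' s2'

-- the flat loop decides SatFunc, given the sets hold exactly the processed prefix
lemma satFlat_iff (rest pre : List (String × (Int × Int))) (s1 : PySem.Set (Int × Int))
    (s2 : PySem.Set (String × (Int × Int)))
    (h1 : ∀ loc, loc ∈ s1 ↔ loc ∈ pre.map Prod.snd)
    (h2 : ∀ p, p ∈ s2 ↔ p ∈ pre)
    (hf : SatFunc pre) :
    satFlat rest s1 s2 = true ↔ SatFunc (pre ++ rest) := by
  induction rest generalizing pre s1 s2 with
  | nil => simpa [satFlat] using hf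
  | cons p rest' ih =>
    obtain ⟨letter, loc⟩ := p
    by_cases hc : (PySem.Set.contains s1 loc && !(PySem.Set.contains s2 (letter, loc))) = true
    · -- conflict: some other letter already at loc
      simp only [satFlat, if_pos hc]
      rw [Bool.and_eq_true, Bool.not_eq_true'] at hc
      obtain ⟨hin, hout⟩ := hc
      have hloc : loc ∈ pre.map Prod.snd := (h1 loc).mp ((PySem.Set.contains_iff s1 loc).mp hin)
      obtain ⟨⟨l', loc'⟩, hq, hqs⟩ := List.mem_map.mp hloc
      simp only at hqs
      subst hqs
      have hnotin : (letter, loc') ∉ pre := by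
        intro hmem
        have hct : PySem.Set.contains s2 (letter, loc') = true :=
          (PySem.Set.contains_iff s2 (letter, loc')).mpr ((h2 _).mpr hmem)
        rw [hout] at hct
        exact Bool.noConfusion hct
      have hne : l' ≠ letter := fun he => hnotin (he ▸ hq)
      constructor
      · intro h; exact absurd h (by simp)
      · intro hF
        exact absurd (hF l' letter loc' (List.mem_append_left _ hq)
          (List.mem_append_right _ (List.mem_cons_self))) hne
    · -- no conflict: extend the prefix with (letter, loc)
      simp only [satFlat, if_neg hc]
      have hcase : loc ∉ pre.map Prod.snd ∨ (letter, loc) ∈ pre := by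
        by_cases hin : loc ∈ pre.map Prod.snd
        · right
          have hs1 : PySem.Set.contains s1 loc = true :=
            (PySem.Set.contains_iff s1 loc).mpr ((h1 loc).mpr hin)
          cases hle : PySem.Set.contains s2 (letter, loc) with
          | true => exact (h2 _).mp ((PySem.Set.contains_iff s2 _).mp hle)
          | false => exact absurd (by rw [hs1, hle]; rfl) hc
        · left; exact hin
      have hf' : SatFunc (pre ++ [(letter, loc)]) := by
        intro l1 l2 x hm1 hm2
        have key : ∀ a : String, (a, x) ∈ pre ++ [(letter, loc)] →
            (a, x) ∈ pre ∨ (a = letter ∧ x = loc) := by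
          intro a h
          rcases List.mem_append.mp h with h | h
          · exact Or.inl h
          · right
            simp only [List.mem_singleton, Prod.mk.injEq] at h
            exact h
        rcases key l1 hm1 with hp1 | ⟨e1, ex⟩
        · rcases key l2 hm2 with hp2 | ⟨e2, ex⟩
          · exact hf l1 l2 x hp1 hp2
          · have hp1' : (l1, loc) ∈ pre := ex ▸ hp1
            rcases hcase with hno | hyes
            · exact absurd (List.mem_map.mpr ⟨(l1, loc), hp1', rfl⟩) hno
            · rw [e2]; exact hf l1 letter loc hp1' hyes
        · rcases key l2 hm2 with hp2 | ⟨e2, _⟩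
          · have hp2' : (l2, loc) ∈ pre := ex ▸ hp2
            rcases hcase with hno | hyes
            · exact absurd (List.mem_map.mpr ⟨(l2, loc), hp2', rfl⟩) hno
            · rw [e1]; exact hf letter l2 loc hyes hp2'
          · rw [e1, e2]
      have h1' : ∀ x, x ∈ PySem.Set.add s1 loc ↔ x ∈ (pre ++ [(letter, loc)]).map Prod.snd := by
        intro x
        rw [PySem.Set.mem_add]
        simp [h1 x]
      have h2' : ∀ q, q ∈ PySem.Set.add s2 (letter, loc) ↔ q ∈ pre ++ [(letter, loc)] := by
        intro q
        rw [PySem.Set.mem_add]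
        simp [h2 q, or_comm]
      rw [ih (pre ++ [(letter, loc)]) _ _ h1' h2' hf']
      simp

-- the length of ofList is the toFinset card
lemma ofList_length_card {α : Type} [DecidableEq α] [BEq α] [LawfulBEq α] (xs : List α) :
    (PySem.Set.ofList xs).length = xs.toFinset.card := by
  have hnd : (PySem.Set.ofList xs).Nodup := PySem.Set.nodup_ofList xs
  have : (PySem.Set.ofList xs).toFinset = xs.toFinset := by
    ext x
    simp [PySem.Set.mem_ofList]
  rw [← this, List.toFinset_card_of_nodup hnd]

-- B's cardinality comparison decides SatFunc
lemma alt_iff (ps : List (String × (Int × Int))) :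
    ((PySem.Set.ofList (ps.map (fun q => q.2))).length == (PySem.Set.ofList ps).length) = true
      ↔ SatFunc ps := by
  rw [beq_iff_eq, ofList_length_card, ofList_length_card]
  have himg : (ps.map (fun q => q.2)).toFinset = ps.toFinset.image (fun q => q.2) := by
    ext x; simp
  rw [himg, Finset.card_image_iff]
  constructor
  · intro hinj l1 l2 loc hm1 hm2
    have := hinj (x₁ := (l1, loc)) (by simpa using hm1) (x₂ := (l2, loc)) (by simpa using hm2) rfl
    exact (Prod.mk.injEq .. ▸ this).1
  · intro hF p hp q hq he
    obtain ⟨l1, x1⟩ := p; obtain ⟨l2, x2⟩ := q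
    simp only at he
    subst he
    rw [Finset.mem_coe, List.mem_toFinset] at hp hq
    rw [hF l1 l2 x1 hp hq]

-- ===== VERDICT (by name: the statement is the Claim_ definition above) =====
theorem satisfied_spec : Claim_equal_satisfied := by
  intro assignment _
  unfold Spec_satisfied satisfied satisfied_alt
  rw [satOuter_eq_satFlat]
  rw [Bool.eq_iff_iff]
  rw [satFlat_iff _ [] _ _ (by simp [PySem.Set.empty]) (by simp [PySem.Set.empty]) (by intro _ _ _ h; simp at h)]
  simpa using (alt_iff (assignment.flatMap (fun p => p.2))).symm
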